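-- pv_equiv track=rewrite | github.com/SentientDoorknob/CryptographyToys | Utility/Tools.py | GetStartingPositions
-- ===== SOURCE A (Python) =====
-- def GetStartingPositions(minimum, length):
--     if length >= 5: return [minimum - 1]
--
--     variance = 5 - length
--     points = []
--
--     for i in range(variance + 1):
--         point = minimum - i - 1
--         if point < 2: break;
--         points.append(point)
--
--     return points
-- ===== SOURCE B (Python) =====
-- def GetStartingPositions(minimum, length):
--     if length >= 5:
--         return [minimum - 1]
--     # candidate points minimum-1-i for i in range(6-length) are strictly
--     # decreasing, so binary-search the first index whose point drops below 2,
--     # then emit that prefix.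
--     lo, hi = 0, 6 - length
--     while lo < hi:
--         mid = (lo + hi) // 2
--         if minimum - 1 - mid < 2:
--             hi = mid
--         else:
--             lo = mid + 1
--     return [minimum - 1 - i for i in range(lo)]
-- ===== Notes on version B (the rewrite author's own statement) =====
-- stated objective: alternative
-- what changed: Instead of A's linear loop that appends points and breaks at the first one below 2, B binary-searches the cut index (the candidates are strictly decreasing, so 'point < 2' is monotone in the index) and then emits that prefix with a comprehension.
import Mathlib
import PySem

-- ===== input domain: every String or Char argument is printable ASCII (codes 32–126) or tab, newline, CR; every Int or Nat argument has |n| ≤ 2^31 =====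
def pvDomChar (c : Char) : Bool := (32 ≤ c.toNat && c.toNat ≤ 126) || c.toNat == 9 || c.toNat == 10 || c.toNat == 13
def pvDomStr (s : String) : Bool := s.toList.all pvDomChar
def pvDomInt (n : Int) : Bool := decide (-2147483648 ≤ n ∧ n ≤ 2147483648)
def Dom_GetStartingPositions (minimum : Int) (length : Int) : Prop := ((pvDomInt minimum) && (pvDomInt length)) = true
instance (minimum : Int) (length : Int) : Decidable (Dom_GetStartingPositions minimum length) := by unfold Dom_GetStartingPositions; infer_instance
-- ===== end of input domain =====

-- B replaces A's append-and-break loop by a binary search for the cut index followed by a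
-- comprehension emitting that prefix; objective: alternative algorithm (not claimed faster).

-- ===== PORT A =====
-- A's for-loop over range(variance+1): consumes the range values, breaks at point < 2
def GSPLoopA (m : Int) : List Int → List Int
  | [] => []
  | i :: rest =>
    let point := m - i - 1
    if point < 2 then [] else point :: GSPLoopA m rest

def GetStartingPositions (minimum : Int) (length : Int) : List Int :=
  if length ≥ 5 then [minimum - 1]
  else
    let variance := 5 - length
    GSPLoopA minimum (PySem.List.pyRange 0 (variance + 1) 1)

-- ===== PORT B =====
-- Source B's while-loop: binary search for the first index mid with minimum - 1 - mid < 2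
def GSPBisect (m : Int) (lo hi : Int) : Int :=
  if h : lo < hi then
    let mid := PySem.Int.floordiv (lo + hi) 2
    if m - 1 - mid < 2 then GSPBisect m lo mid
    else GSPBisect m (mid + 1) hi
  else lo
termination_by (hi - lo).toNat
decreasing_by
  all_goals
    have he := PySem.Int.floordiv_eq_ediv_of_pos (a := lo + hi) (b := 2) (by omega)
    simp only [he]
    omega

def GetStartingPositions_alt (minimum : Int) (length : Int) : List Int :=
  if length ≥ 5 then [minimum - 1]
  else
    let lo := GSPBisect minimum 0 (6 - length)
    (PySem.List.pyRange 0 lo 1).map (fun i => minimum - 1 - i)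

-- ===== PRECONDITION & SPEC =====
def Spec_GetStartingPositions (minimum : Int) (length : Int) (out : List Int) : Prop := out = GetStartingPositions_alt minimum length
instance (minimum : Int) (length : Int) (out : List Int) : Decidable (Spec_GetStartingPositions minimum length out) := by unfold Spec_GetStartingPositions; infer_instance

-- ===== CLAIM (what is proved, stated in full; the proofs are below) =====
def Claim_equal_GetStartingPositions : Prop := ∀ (minimum : Int) (length : Int), Dom_GetStartingPositions minimum length → Spec_GetStartingPositions minimum length (GetStartingPositions minimum length)

-- ===== LEMMAS AND PROOFS =====

-- the binary search computes the clamp of m - 2 (the first index whose point is below 2) to [lo, hi]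
theorem GSPBisect_eq (m : Int) : ∀ (n : Nat) (lo hi : Int), hi - lo = n →
    GSPBisect m lo hi = max lo (min hi (m - 2)) := by
  intro n
  induction n using Nat.strong_induction_on with
  | _ n ih =>
    intro lo hi hn
    rw [GSPBisect]
    by_cases h : lo < hi
    · rw [dif_pos h]
      have hb := PySem.Int.floordiv_two_mid_bounds (lo := lo) (hi := hi) (le_of_lt h)
      set mid := PySem.Int.floordiv (lo + hi) 2 with hmid
      have hlt : mid < hi := by
        rw [hmid, PySem.Int.floordiv_eq_ediv_of_pos (by omega)]
        omega
      have hge : lo ≤ mid := hb.1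
      by_cases hc : m - 1 - mid < 2
      · rw [if_pos hc, ih (mid - lo).toNat (by omega) lo mid (by omega)]
        omega
      · rw [if_neg hc, ih (hi - (mid + 1)).toNat (by omega) (mid + 1) hi (by omega)]
        omega
    · rw [dif_neg h]
      omega

-- A's loop over range(a, a+n) equals the mapped prefix up to the clamped cut index
theorem GSPLoopA_eq_map (m : Int) (n : Nat) : ∀ (a : Int),
    GSPLoopA m (PySem.List.pyRange a (a + n) 1)
      = (PySem.List.pyRange a (max a (min (a + n) (m - 2))) 1).map (fun i => m - 1 - i) := by
  induction n with
  | zero =>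
    intro a
    rw [PySem.List.pyRange_one_eq_nil (by omega), PySem.List.pyRange_one_eq_nil (by omega)]
    rfl
  | succ n ih =>
    intro a
    rw [PySem.List.pyRange_one_cons (by omega)]
    show (if m - a - 1 < 2 then [] else
          (m - a - 1) :: GSPLoopA m (PySem.List.pyRange (a + 1) (a + (n + 1 : Nat)) 1)) = _
    by_cases h : m - a - 1 < 2
    · rw [if_pos h, PySem.List.pyRange_one_eq_nil (by omega)]
      rfl
    · rw [if_neg h]
      rw [show a + ((n + 1 : Nat) : Int) = (a + 1) + (n : Int) by push_cast; ring, ih (a + 1)]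
      have hK : max a (min (a + 1 + (n : Int)) (m - 2))
          = max (a + 1) (min (a + 1 + (n : Int)) (m - 2)) := by omega
      rw [hK]
      conv_rhs => rw [PySem.List.pyRange_one_cons
        (show a < max (a + 1) (min (a + 1 + (n : Int)) (m - 2)) by omega)]
      rw [List.map_cons, show m - 1 - a = m - a - 1 by ring]

-- ===== VERDICT (by name: the statement is the Claim_ definition above) =====
theorem GetStartingPositions_spec : Claim_equal_GetStartingPositions := by
  intro m l _
  unfold Spec_GetStartingPositions GetStartingPositions GetStartingPositions_alt
  by_cases h : l ≥ 5
  · rw [if_pos h, if_pos h]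
  · rw [if_neg h, if_neg h]
    show GSPLoopA m (PySem.List.pyRange 0 ((5 - l) + 1) 1)
        = (PySem.List.pyRange 0 (GSPBisect m 0 (6 - l)) 1).map (fun i => m - 1 - i)
    rw [GSPBisect_eq m (6 - l).toNat 0 (6 - l) (by omega)]
    rw [show (5 - l) + 1 = (0 : Int) + (((6 - l).toNat : Nat) : Int) by omega,
        GSPLoopA_eq_map m (6 - l).toNat 0]
    congr 2
    omega
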